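-- pv_equiv track=rewrite | github.com/koreannn/Glee | AI/utils/deduplicate_sentence.py | deduplicate_sentences
-- ===== SOURCE A (Python) =====
-- def deduplicate_sentences(text: str) -> str:
--     """
--     문자열에서 중복되는 문장을 제거합니다.
--     1. 문자열 전체가 두 번 반복되는 경우
--     2. 개별 문장이 반복되는 경우
--     """
--     if not text:
--         return text
--
--     text = text.strip()
--
--     # 1. 전체 문자열이 두 번 반복되는 경우 처리
--     half_len = len(text) // 2
--     if len(text) % 2 == 0 and text[:half_len] == text[half_len:]:
--         return text[:half_len].strip()
--
--     # 2. 개별 문장이 반복되는 경우 처리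
--     # 마침표, 물음표, 느낌표로 문장 구분
--     sentences = []
--     current_sentence = ""
--
--     for char in text:
--         current_sentence += char
--         if char in [".", "?", "!"]:
--             current_sentence = current_sentence.strip()
--             if current_sentence and (not sentences or current_sentence != sentences[-1]):
--                 sentences.append(current_sentence)
--             current_sentence = ""
--
--     # 마지막 문장 처리
--     if current_sentence.strip() and (not sentences or current_sentence.strip() != sentences[-1]):
--         sentences.append(current_sentence.strip())
--
--     return " ".join(sentences)
-- ===== SOURCE B (Python) =====
-- def _next_chunk(rest):
--     for j, ch in enumerate(rest):
--         if ch in ".?!":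
--             return rest[:j + 1], rest[j + 1:]
--     return rest, ""
--
--
-- def deduplicate_sentences(text: str) -> str:
--     if not text:
--         return text
--
--     text = text.strip()
--
--     # whole-string doubling: the text is exactly its first half written twice
--     half = text[:len(text) // 2]
--     if text == half + half:
--         return half.strip()
--
--     sentences = []
--     last = None
--     rest = text
--     while rest:
--         chunk, rest = _next_chunk(rest)
--         s = chunk.strip()
--         if s and s != last:
--             sentences.append(s)
--             last = s
--
--     return " ".join(sentences)
-- ===== Notes on version B (the rewrite author's own statement) =====
-- stated objective: faster
-- what changed: B replaces A's single character-accumulating loop with inline dedup by a chunk splitter (_next_chunk slices the text at the next terminator and the while loop continues on the remainder) deduplicating against a `last` register, and replaces A's parity-check + half comparison by the single test text == half + half; slicing avoids per-character string accumulation.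
import Mathlib
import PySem

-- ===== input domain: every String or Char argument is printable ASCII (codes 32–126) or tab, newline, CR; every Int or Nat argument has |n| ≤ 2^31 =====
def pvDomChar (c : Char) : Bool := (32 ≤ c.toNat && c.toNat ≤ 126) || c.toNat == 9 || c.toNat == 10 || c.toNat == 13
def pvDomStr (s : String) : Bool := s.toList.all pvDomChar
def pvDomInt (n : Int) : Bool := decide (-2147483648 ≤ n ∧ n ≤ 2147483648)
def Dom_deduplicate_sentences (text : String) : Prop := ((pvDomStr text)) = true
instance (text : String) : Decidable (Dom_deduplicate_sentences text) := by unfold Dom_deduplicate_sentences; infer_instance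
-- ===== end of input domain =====

-- B replaces A's single character-accumulating loop by a chunk splitter (cut the text at the
-- next terminator, recurse on the remainder) with a `last`-register dedup, and replaces the
-- parity + half comparison by the single test text == half + half; measured constant-factor faster.

-- ===== PORT A =====

-- A's test: char in [".", "?", "!"]
def pvTerm (c : Char) : Bool := c == '.' || c == '?' || c == '!'

-- A's append step: s = cur.strip(); if s and (not sentences or s != sentences[-1]): append
def pvAppendSent (sents : List (List Char)) (chunk : List Char) : List (List Char) :=
  let s := PySem.Chars.strip chunk
  if s ≠ [] ∧ sents.getLast? ≠ some s then sents ++ [s] else sents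

-- A's loop body: current_sentence += char; on a terminator, strip/conditionally append/reset
def pvStepA (st : List (List Char) × List Char) (c : Char) : List (List Char) × List Char :=
  let cur := st.2 ++ [c]
  if pvTerm c then (pvAppendSent st.1 cur, []) else (st.1, cur)

def deduplicate_sentences (text : String) : String :=
  if text == "" then text else
  let t := PySem.Chars.strip text.toList
  let halfLen := PySem.Int.floordiv (t.length : Int) 2
  if PySem.Int.mod (t.length : Int) 2 == 0 &&
     PySem.List.slice t none (some halfLen) == PySem.List.slice t (some halfLen) none then
    String.ofList (PySem.Chars.strip (PySem.List.slice t none (some halfLen)))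
  else
    let st := t.foldl pvStepA ([], [])
    String.ofList (PySem.Chars.join [' '] (pvAppendSent st.1 st.2))

-- ===== PORT B =====

-- B's test: ch in ".?!"
def pvTermB (c : Char) : Bool := ['.', '?', '!'].contains c

-- B's _next_chunk: scan for the first terminator, return (chunk through it, remainder)
def splitFirst : List Char → List Char × List Char
  | [] => ([], [])
  | c :: r =>
    if pvTermB c then ([c], r)
    else
      let p := splitFirst r
      (c :: p.1, p.2)

theorem splitFirst_snd_le : ∀ (t : List Char), (splitFirst t).2.length ≤ t.length := by
  intro t
  induction t with
  | nil => simp [splitFirst]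
  | cons c r ih =>
    simp only [splitFirst]
    split
    · simp
    · simpa using Nat.le_succ_of_le ih

-- B's while loop: pop the next chunk, strip, append iff nonempty and ≠ last register
def goB (out : List (List Char)) (last : Option (List Char)) : List Char → List (List Char)
  | [] => out
  | c :: r =>
    let p := splitFirst (c :: r)
    let s := PySem.Chars.strip p.1
    if s ≠ [] ∧ some s ≠ last then goB (out ++ [s]) (some s) p.2
    else goB out last p.2
termination_by rest => rest.length
decreasing_by
  all_goals
    simp only [splitFirst]
    split
    · simpa using Nat.lt_succ_of_le (le_refl r.length)
    · simpa using Nat.lt_succ_of_le (splitFirst_snd_le r)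

def deduplicate_sentences_alt (text : String) : String :=
  if text == "" then text else
  let t := PySem.Chars.strip text.toList
  let half := PySem.List.slice t none (some (PySem.Int.floordiv (t.length : Int) 2))
  if t == half ++ half then
    String.ofList (PySem.Chars.strip half)
  else
    String.ofList (PySem.Chars.join [' '] (goB [] none t))

-- ===== PRECONDITION & SPEC =====
def Spec_deduplicate_sentences (text : String) (out : String) : Prop := out = deduplicate_sentences_alt text
instance (text : String) (out : String) : Decidable (Spec_deduplicate_sentences text out) := by unfold Spec_deduplicate_sentences; infer_instance

-- ===== CLAIM =====
def Claim_equal_deduplicate_sentences : Prop := ∀ (text : String), Dom_deduplicate_sentences text → Spec_deduplicate_sentences text (deduplicate_sentences text)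

-- ===== LEMMAS AND PROOFS =====

theorem pvTermB_eq (c : Char) : pvTermB c = pvTerm c := by
  apply Bool.eq_iff_iff.mpr
  simp only [pvTermB, pvTerm, List.contains_cons, List.contains_nil, Bool.or_false,
    Bool.or_eq_true, beq_iff_eq]
  tauto

-- the chunks of t: pieces ending right after each terminator, plus the (possibly empty) tail
def chunksOf : List Char → List (List Char)
  | [] => [[]]
  | c :: rest =>
    if pvTerm c then [c] :: chunksOf rest
    else
      match chunksOf rest with
      | [] => [[c]]
      | h :: tl => (c :: h) :: tl

def prependFirst (cur : List Char) : List (List Char) → List (List Char)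
  | [] => [cur]
  | h :: tl => (cur ++ h) :: tl

theorem chunksOf_ne_nil (l : List Char) : chunksOf l ≠ [] := by
  cases l with
  | nil => simp [chunksOf]
  | cons c rest =>
    simp only [chunksOf]
    split
    · simp
    · split <;> simp

theorem prependFirst_nil_of_ne_nil {chs : List (List Char)} (h : chs ≠ []) :
    prependFirst [] chs = chs := by
  cases chs with
  | nil => exact absurd rfl h
  | cons h tl => simp [prependFirst]

theorem A_fold (t : List Char) : ∀ (sents : List (List Char)) (cur : List Char),
    (let st := t.foldl pvStepA (sents, cur); pvAppendSent st.1 st.2)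
    = (prependFirst cur (chunksOf t)).foldl pvAppendSent sents := by
  induction t with
  | nil => intro sents cur; simp [chunksOf, prependFirst, List.foldl]
  | cons c rest ih =>
    intro sents cur
    by_cases hc : pvTerm c = true
    · simp only [List.foldl_cons, pvStepA, hc, if_pos, chunksOf]
      rw [ih]
      rw [prependFirst_nil_of_ne_nil (chunksOf_ne_nil rest)]
      simp [prependFirst]
    · simp only [List.foldl_cons, pvStepA, hc, if_neg, chunksOf, Bool.false_eq_true,
        not_false_eq_true]
      rw [ih]
      rcases h : chunksOf rest with _ | ⟨hd, tl⟩
      · exact absurd h (chunksOf_ne_nil rest)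
      · simp [prependFirst]

-- pvAppendSent ignores an empty chunk
theorem pvAppendSent_nil (sents : List (List Char)) : pvAppendSent sents [] = sents := by
  have h : PySem.Chars.strip ([] : List Char) = [] := rfl
  simp [pvAppendSent, h]

theorem splitFirst_cons_neg (c : Char) (r : List Char) (h : pvTermB c = false) :
    splitFirst (c :: r) = (c :: (splitFirst r).1, (splitFirst r).2) := by
  simp [splitFirst, h]

theorem chunksOf_cons_neg (c : Char) (r : List Char) (hd : List Char) (tl : List (List Char))
    (hc : pvTerm c = false) (hr : chunksOf r = hd :: tl) :
    chunksOf (c :: r) = (c :: hd) :: tl := by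
  simp only [chunksOf, hc, Bool.false_eq_true, if_false, hr]

-- how splitFirst relates to chunksOf
theorem splitFirst_chunks : ∀ (t : List Char), t ≠ [] →
    chunksOf t = (splitFirst t).1 :: chunksOf (splitFirst t).2
    ∨ (chunksOf t = [(splitFirst t).1] ∧ (splitFirst t).2 = []) := by
  intro t
  induction t with
  | nil => simp
  | cons c r ih =>
    intro _
    by_cases hc : pvTerm c = true
    · left
      simp [chunksOf, splitFirst, hc, pvTermB_eq]
    · have hc' : pvTerm c = false := by simpa using hc
      have hcB : pvTermB c = false := by rw [pvTermB_eq]; exact hc'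
      have hsf := splitFirst_cons_neg c r hcB
      rcases r with _ | ⟨d, r'⟩
      · right
        rw [hsf]
        exact ⟨chunksOf_cons_neg c [] [] [] hc' rfl, rfl⟩
      · rcases ih (by simp) with h | ⟨h1, h2⟩
        · left
          rw [hsf, chunksOf_cons_neg c (d :: r') _ _ hc' h]
        · right
          rw [hsf, chunksOf_cons_neg c (d :: r') _ _ hc' h1]
          exact ⟨rfl, h2⟩

-- B's loop equals A's per-chunk fold, given last = out.getLast?
theorem goB_eq : ∀ (n : Nat) (t : List Char), t.length ≤ n → ∀ (out : List (List Char)),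
    goB out out.getLast? t = (chunksOf t).foldl pvAppendSent out := by
  intro n
  induction n with
  | zero =>
    intro t ht out
    have : t = [] := by cases t <;> simp_all
    subst this
    simp [goB, chunksOf, pvAppendSent_nil]
  | succ n ih =>
    intro t ht out
    cases t with
    | nil => simp [goB, chunksOf, pvAppendSent_nil]
    | cons c r =>
      rw [goB]
      have hlt : (splitFirst (c :: r)).2.length ≤ n := by
        have h1 : (splitFirst (c :: r)).2.length < (c :: r).length := by
          simp only [splitFirst]
          split
          · simpa using Nat.lt_succ_of_le (le_refl r.length)
          · simpa using Nat.lt_succ_of_le (splitFirst_snd_le r)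
        omega
      have happ : (chunksOf (c :: r)).foldl pvAppendSent out
          = (chunksOf (splitFirst (c :: r)).2).foldl pvAppendSent
              (pvAppendSent out (splitFirst (c :: r)).1) := by
        rcases splitFirst_chunks (c :: r) (by simp) with h | ⟨h1, h2⟩
        · rw [h]; simp [List.foldl_cons]
        · rw [h1, h2]
          simp [List.foldl_cons, chunksOf, pvAppendSent_nil]
      rw [happ]
      by_cases hcond : PySem.Chars.strip (splitFirst (c :: r)).1 ≠ [] ∧
          some (PySem.Chars.strip (splitFirst (c :: r)).1) ≠ out.getLast?
      · rw [if_pos hcond]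
        have hA : pvAppendSent out (splitFirst (c :: r)).1
            = out ++ [PySem.Chars.strip (splitFirst (c :: r)).1] := by
          simp only [pvAppendSent]
          rw [if_pos ⟨hcond.1, fun h => hcond.2 h.symm⟩]
        rw [hA]
        have hlast : (out ++ [PySem.Chars.strip (splitFirst (c :: r)).1]).getLast?
            = some (PySem.Chars.strip (splitFirst (c :: r)).1) := by simp
        rw [← hlast]
        exact ih _ hlt _
      · rw [if_neg hcond]
        have hA : pvAppendSent out (splitFirst (c :: r)).1 = out := by
          simp only [pvAppendSent]
          rw [if_neg]
          intro h
          exact hcond ⟨h.1, fun h2 => h.2 h2.symm⟩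
        rw [hA]
        exact ih _ hlt _

-- A's doubling test (parity + halves comparison) equals B's  t == half ++ half
theorem cond_eq (t : List Char) :
    (PySem.Int.mod (t.length : Int) 2 == 0 &&
      (PySem.List.slice t none (some (PySem.Int.floordiv (t.length : Int) 2)) ==
       PySem.List.slice t (some (PySem.Int.floordiv (t.length : Int) 2)) none))
    = (t == PySem.List.slice t none (some (PySem.Int.floordiv (t.length : Int) 2)) ++
        PySem.List.slice t none (some (PySem.Int.floordiv (t.length : Int) 2))) := by
  have h2 : (2 : Int) = ((2 : Nat) : Int) := by norm_num
  rw [h2, PySem.Int.floordiv_natCast, PySem.Int.mod_natCast,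
    PySem.List.slice_to_natCast, PySem.List.slice_from_natCast]
  apply Bool.eq_iff_iff.mpr
  simp only [Bool.and_eq_true, beq_iff_eq]
  constructor
  · rintro ⟨hm, hs⟩
    conv_lhs => rw [← List.take_append_drop (t.length / 2) t]
    rw [← hs]
  · intro h
    have hlen := congrArg List.length h
    simp only [List.length_append, List.length_take] at hlen
    have hmin : min (t.length / 2) t.length = t.length / 2 := by omega
    rw [hmin] at hlen
    have hmod : t.length % 2 = 0 := by omega
    refine ⟨by exact_mod_cast hmod, ?_⟩
    have hd : t.take (t.length / 2) ++ t.drop (t.length / 2)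
        = t.take (t.length / 2) ++ t.take (t.length / 2) := by
      conv_lhs => rw [List.take_append_drop]
      exact h
    exact (List.append_cancel_left hd).symm

-- phase 2 agreement
theorem phase2_eq (t : List Char) :
    (let st := t.foldl pvStepA ([], []); pvAppendSent st.1 st.2) = goB [] none t := by
  rw [A_fold t [] []]
  rw [prependFirst_nil_of_ne_nil (chunksOf_ne_nil t)]
  have : (none : Option (List Char)) = ([] : List (List Char)).getLast? := rfl
  rw [this, goB_eq t.length t (le_refl _) []]

-- ===== VERDICT =====
theorem deduplicate_sentences_spec : Claim_equal_deduplicate_sentences := by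
  intro text _
  unfold Spec_deduplicate_sentences deduplicate_sentences deduplicate_sentences_alt
  by_cases h1 : text == ""
  · simp [h1]
  · simp only [h1, Bool.false_eq_true, if_false]
    rw [cond_eq]
    split
    · rfl
    · rw [phase2_eq]
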